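-- pv_equiv track=rewrite | github.com/jitendra-ky/learn_cpp | try0.py | tc
-- ===== SOURCE A (Python) =====
-- def tc(n, a):
--     a.sort()
--     s = sum(a)
--
--     ln = None
--
--     for i in range(0,n,2):
--         a1 = a[i]
--         if i == n-1:
--             return s
--         a2 = a[i+1]
--         if a1 <= 0 and a2 <=0:
--             ts = (a1 + a2) * -1
--             s += 2*ts
--         elif a1 <= 0:
--             ln = i
--             break
--         elif a2 <= 0:
--             ln = i+1
--             break
--
--     if ln == None or ln == (n-1):
--         return s
--
--     aln = abs(a[ln])
--     aln2 = a[ln+1]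
--     if aln > aln2:
--         s += 2*(aln-aln2)
--
--     return s
-- ===== SOURCE B (Python) =====
-- def tc(n, a):
--     # Return-value equivalent to A for n <= len(a); also sorts a in place like A.
--     a.sort()
--     s = sum(a)
--     # hand-rolled bisect_right(a, 0, 0, n): k = number of non-positive among a[:n]
--     lo, hi = 0, n
--     while lo < hi:
--         mid = (lo + hi) // 2
--         if a[mid] <= 0:
--             lo = mid + 1
--         else:
--             hi = mid
--     k = lo
--     m = 2 * (k // 2)
--     s -= 2 * sum(a[:m])
--     if k % 2 == 1 and k < n:
--         d = -a[k - 1] - a[k]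
--         if d > 0:
--             s += 2 * d
--     return s
-- ===== Notes on version B (the rewrite author's own statement) =====
-- stated objective: alternative
-- what changed: A scans the sorted array pairwise with an early-return/break state machine; B binary-searches for the sign boundary k among the first n sorted elements, adds the bulk contribution of the 2*(k//2) non-positive elements with one slice sum, and handles the single leftover negative/positive pair directly.
-- outside the precondition, e.g. on tc(5, [-1, 1]): A returns 0, B raises IndexError; on tc(3, [-1, 2]): A returns 1, B returns 1
import Mathlib
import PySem

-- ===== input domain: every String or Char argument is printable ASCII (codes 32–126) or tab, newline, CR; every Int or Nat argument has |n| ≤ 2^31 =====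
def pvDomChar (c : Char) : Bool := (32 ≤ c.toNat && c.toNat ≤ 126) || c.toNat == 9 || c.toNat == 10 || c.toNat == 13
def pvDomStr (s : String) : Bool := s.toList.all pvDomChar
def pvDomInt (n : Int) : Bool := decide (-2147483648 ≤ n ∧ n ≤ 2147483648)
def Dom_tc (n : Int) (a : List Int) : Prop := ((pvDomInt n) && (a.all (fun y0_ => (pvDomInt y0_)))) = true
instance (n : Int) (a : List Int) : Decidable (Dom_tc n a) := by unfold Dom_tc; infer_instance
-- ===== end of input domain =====

-- B replaces A's linear pair-scan by a hand-rolled binary search for the sign boundary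
-- plus one bulk slice sum (objective: alternative decomposition; return-value equivalence —
-- both Pythons also sort `a` in place, an identical side effect not modelled here).

-- ===== PORT A =====
-- a.sort(): both Pythons call the same built-in sort; ported as Lean's library sort
-- (List.mergeSort), which computes the same sorted list of Ints.
def pySort (xs : List Int) : List Int := xs.mergeSort (fun x y => decide (x ≤ y))

-- A's `for i in range(0,n,2)` loop as index recursion (range(...) is a lazy iterator in
-- Python): returns `Sum.inl r` for an early `return r`, `Sum.inr (s, ln)` for falling
-- through / breaking with the final `s` and `ln`. `pyGet? = none` is exactly Python's
-- IndexError, excluded by Pre_tc; the value returned there is irrelevant.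
def tcGo (n : Int) (a : List Int) (s : Int) (i : Int) : Int ⊕ (Int × Option Int) :=
  if _hi : i < n then
    match PySem.List.pyGet? a i with
    | none => Sum.inl 0   -- IndexError (outside Pre_tc)
    | some a1 =>
      if i = n - 1 then Sum.inl s
      else
        match PySem.List.pyGet? a (i + 1) with
        | none => Sum.inl 0   -- IndexError (outside Pre_tc)
        | some a2 =>
          if a1 ≤ 0 ∧ a2 ≤ 0 then tcGo n a (s + 2 * ((a1 + a2) * (-1))) (i + 2)
          else if a1 ≤ 0 then Sum.inr (s, some i)
          else if a2 ≤ 0 then Sum.inr (s, some (i + 1))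
          else tcGo n a s (i + 2)
  else Sum.inr (s, none)
termination_by (n - i).toNat
decreasing_by all_goals omega

-- A's code after the loop (`if ln == None or ln == (n-1): …`).
def tcFin (n : Int) (a : List Int) : Int ⊕ (Int × Option Int) → Int
  | Sum.inl r => r
  | Sum.inr (s, none) => s
  | Sum.inr (s, some ln) =>
    if ln = n - 1 then s
    else
      let aln := |PySem.List.pyGetD a ln 0|
      let aln2 := PySem.List.pyGetD a (ln + 1) 0
      if aln > aln2 then s + 2 * (aln - aln2) else s

def tc (n : Int) (a : List Int) : Int :=
  let b := pySort a   -- a.sort() (in-place; return value modelled)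
  let s := b.sum
  tcFin n b (tcGo n b s 0)

-- ===== PORT B =====
-- B's hand-written `while lo < hi` binary search (bisect_right(a, 0, 0, n)).
def tcBis (a : List Int) (lo hi : Int) : Int :=
  if h : lo < hi then
    let mid := PySem.Int.floordiv (lo + hi) 2
    if PySem.List.pyGetD a mid 0 ≤ 0 then tcBis a (mid + 1) hi
    else tcBis a lo mid
  else lo
termination_by (hi - lo).toNat
decreasing_by
  · have := PySem.Int.floordiv_two_mid_bounds (le_of_lt h)
    omega
  · have h2 := PySem.Int.floordiv_two_mid_bounds (le_of_lt h)
    have h3 := (PySem.Int.floordiv_lt_iff_lt_mul (a := lo + hi) (b := 2) (q := hi)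
      (by norm_num)).mpr (by omega)
    omega

def tc_alt (n : Int) (a : List Int) : Int :=
  let b := pySort a   -- a.sort() (in-place; return value modelled)
  let s := b.sum
  let k := tcBis b 0 n
  let m := 2 * PySem.Int.floordiv k 2
  let s := s - 2 * (PySem.List.slice b none (some m)).sum
  if PySem.Int.mod k 2 = 1 ∧ k < n then
    let d := -PySem.List.pyGetD b (k - 1) 0 - PySem.List.pyGetD b k 0
    if d > 0 then s + 2 * d else s
  else s

-- ===== PRECONDITION & SPEC =====
-- Pre_ excludes n > len(a): there both scans read past the end of the list — usually an
-- IndexError; whether a run survives (A via an early break of its pair scan, B via binary-search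
-- probes that happen to stay in range) differs between the two, so behaviour there is accidental.
def Pre_tc (n : Int) (a : List Int) : Prop := n ≤ (a.length : Int)
instance (n : Int) (a : List Int) : Decidable (Pre_tc n a) := by unfold Pre_tc; infer_instance

def pvWitness_tc : Int × List Int := (3, [-2, 1, 4])

def Spec_tc (n : Int) (a : List Int) (out : Int) : Prop := out = tc_alt n a
instance (n : Int) (a : List Int) (out : Int) : Decidable (Spec_tc n a out) := by unfold Spec_tc; infer_instance

-- ===== CLAIM (what is proved, stated in full; the proofs are below) =====
def Claim_equal_tc : Prop := ∀ (n : Int) (a : List Int), Dom_tc n a → Pre_tc n a → Spec_tc n a (tc n a)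

-- ===== LEMMAS AND PROOFS =====

-- an index known to be in range reads a value (pyGet? cannot be none there)
lemma pyGet?_some_of_lt (b : List Int) (j : Int) (h0 : 0 ≤ j) (hj : j < (b.length : Int)) :
    PySem.List.pyGet? b j = some (PySem.List.pyGetD b j 0) := by
  have h1 : j.toNat < b.length := by omega
  rw [PySem.List.pyGet?_of_nonneg b h0, List.getElem?_eq_getElem h1,
      PySem.List.pyGetD_eq_getElem b 0 h0 hj]

-- boundary of the non-positive prefix of a sorted list, via countP
lemma countP_sorted_boundary :
    ∀ (l : List Int), l.Pairwise (· ≤ ·) → ∀ (i : Nat) (h : i < l.length),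
      (l[i] ≤ 0 ↔ i < l.countP (fun x => decide (x ≤ 0))) := by
  intro l hl
  induction l with
  | nil => intro i h; simp at h
  | cons x t ih =>
    have hx : ∀ y ∈ t, x ≤ y := (List.pairwise_cons.mp hl).1
    have ht : t.Pairwise (· ≤ ·) := (List.pairwise_cons.mp hl).2
    intro i h
    cases i with
    | zero =>
      simp only [List.getElem_cons_zero, List.countP_cons]
      by_cases hx0 : x ≤ 0
      · simp [hx0]
      · have h0 : t.countP (fun x => decide (x ≤ 0)) = 0 := by
          rw [List.countP_eq_zero]
          intro y hy
          have := hx y hy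
          simp only [decide_eq_true_eq]
          omega
        simp only [List.length_cons] at h
        simp [hx0, h0]
    | succ j =>
      simp only [List.getElem_cons_succ, List.countP_cons]
      have hj : j < t.length := by simpa using h
      have := ih ht j hj
      by_cases hx0 : x ≤ 0
      · rw [this]
        simp [hx0]
      · have h0 : t.countP (fun x => decide (x ≤ 0)) = 0 := by
          rw [List.countP_eq_zero]
          intro y hy
          have := hx y hy
          simp only [decide_eq_true_eq]
          omega
        have hgt : ¬ t[j] ≤ 0 := by
          have := hx t[j] (List.getElem_mem hj)
          omega
        simp [hx0, h0, hgt]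

-- A's loop over the all-positive tail: nothing changes, result is s
lemma tcGo_ge (n K : Int) (b : List Int) (hnL : n ≤ (b.length : Int))
    (H : ∀ i : Int, 0 ≤ i → i < n → (PySem.List.pyGetD b i 0 ≤ 0 ↔ i < K)) :
    ∀ (c : Nat) (i s : Int), 0 ≤ i → K ≤ i → (n - i).toNat ≤ c →
      tcFin n b (tcGo n b s i) = s := by
  intro c
  induction c with
  | zero =>
    intro i s h0 hK hc
    rw [tcGo, dif_neg (by omega)]
    rfl
  | succ c ih =>
    intro i s h0 hK hc
    by_cases hin : i < n
    · rw [tcGo, dif_pos hin, pyGet?_some_of_lt b i h0 (by omega)]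
      simp only []
      by_cases hlast : i = n - 1
      · rw [if_pos hlast]
        rfl
      · rw [if_neg hlast, pyGet?_some_of_lt b (i + 1) (by omega) (by omega)]
        simp only []
        have ha1 : ¬ PySem.List.pyGetD b i 0 ≤ 0 := by
          rw [H i h0 hin]; omega
        have ha2 : ¬ PySem.List.pyGetD b (i + 1) 0 ≤ 0 := by
          rw [H (i + 1) (by omega) (by omega)]; omega
        rw [if_neg (by tauto), if_neg ha1, if_neg ha2]
        exact ih (i + 2) s (by omega) (by omega) (by omega)
    · rw [tcGo, dif_neg hin]
      rfl

-- B's binary search finds the boundary K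
lemma tcBis_eq (n K : Int) (b : List Int)
    (H : ∀ i : Int, 0 ≤ i → i < n → (PySem.List.pyGetD b i 0 ≤ 0 ↔ i < K)) :
    ∀ (c : Nat) (lo hi : Int), 0 ≤ lo → lo ≤ K → K ≤ hi → hi ≤ n → (hi - lo).toNat ≤ c →
      tcBis b lo hi = K := by
  intro c
  induction c with
  | zero =>
    intro lo hi h0 hloK hKhi hhin hc
    rw [tcBis, dif_neg (by omega)]
    omega
  | succ c ih =>
    intro lo hi h0 hloK hKhi hhin hc
    by_cases hlt : lo < hi
    · have hmid := PySem.Int.floordiv_two_mid_bounds (le_of_lt hlt)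
      have hmidlt : PySem.Int.floordiv (lo + hi) 2 < hi :=
        (PySem.Int.floordiv_lt_iff_lt_mul (by norm_num)).mpr (by omega)
      rw [tcBis, dif_pos hlt]
      simp only []
      by_cases hv : PySem.List.pyGetD b (PySem.Int.floordiv (lo + hi) 2) 0 ≤ 0
      · have hKmid : PySem.Int.floordiv (lo + hi) 2 < K := by
          rw [← H _ (by omega) (by omega)]; exact hv
        rw [if_pos hv]
        exact ih _ hi (by omega) (by omega) hKhi hhin (by omega)
      · have hKmid : ¬ PySem.Int.floordiv (lo + hi) 2 < K := by
          rw [← H _ (by omega) (by omega)]; exact hv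
        rw [if_neg hv]
        exact ih lo _ h0 hloK (by omega) (by omega) (by omega)
    · rw [tcBis, dif_neg hlt]
      omega

-- the state of A's loop after the bulk pairs: at i = M the remaining value is s plus the leftover term
lemma tcGo_at_M (n K : Int) (b : List Int) (hnL : n ≤ (b.length : Int))
    (H : ∀ i : Int, 0 ≤ i → i < n → (PySem.List.pyGetD b i 0 ≤ 0 ↔ i < K))
    (hK0 : 0 ≤ K) (hKn : K ≤ n) (s : Int) :
    tcFin n b (tcGo n b s (2 * PySem.Int.floordiv K 2)) =
      s + (if PySem.Int.mod K 2 = 1 ∧ K < n then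
             (if 0 < -PySem.List.pyGetD b (K - 1) 0 - PySem.List.pyGetD b K 0
              then 2 * (-PySem.List.pyGetD b (K - 1) 0 - PySem.List.pyGetD b K 0) else 0)
           else 0) := by
  have hdm := PySem.Int.floordiv_mul_add_mod K 2
  have hm2 := PySem.Int.mod_two_eq K
  set M := 2 * PySem.Int.floordiv K 2 with hM
  rcases hm2 with hmod | hmod
  · -- K even: loop runs off over positives, extra term absent
    rw [tcGo_ge n K b hnL H (n - M).toNat M s (by omega) (by omega) (le_refl _)]
    have hcond : ¬ (PySem.Int.mod K 2 = 1 ∧ K < n) := by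
      rintro ⟨h1, -⟩
      rw [hmod] at h1
      exact absurd h1 (by norm_num)
    rw [if_neg hcond]
    ring
  · by_cases hKn' : K < n
    · -- break at i = K - 1, leftover pair decides the extra term
      have hMK1 : M = K - 1 := by omega
      have hlast : ¬ M = n - 1 := by omega
      have ha1 : PySem.List.pyGetD b M 0 ≤ 0 := by
        rw [H M (by omega) (by omega)]; omega
      have ha2 : ¬ PySem.List.pyGetD b (M + 1) 0 ≤ 0 := by
        have e : M + 1 = K := by omega
        rw [e, H K hK0 hKn']; omega
      rw [tcGo, dif_pos (by omega), pyGet?_some_of_lt b M (by omega) (by omega)]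
      simp only []
      rw [if_neg hlast, pyGet?_some_of_lt b (M + 1) (by omega) (by omega)]
      simp only []
      rw [if_neg (by tauto), if_pos ha1]
      simp only [tcFin, if_neg hlast]
      rw [if_pos (show PySem.Int.mod K 2 = 1 ∧ K < n from ⟨hmod, hKn'⟩),
          show K - 1 = M from by omega, show K = M + 1 from by omega,
          abs_of_nonpos ha1]
      split_ifs with h1 h2 h2
      · ring
      · omega
      · omega
      · ring
    · -- K = n (odd): early return at i = n - 1
      have hiM : M = n - 1 := by omega
      rw [tcGo, dif_pos (by omega), pyGet?_some_of_lt b M (by omega) (by omega)]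
      simp only []
      rw [if_pos hiM]
      simp only [tcFin]
      rw [if_neg (fun h => hKn' h.2)]
      ring

-- main invariant of A's loop on the non-positive pairs
lemma tcGo_main (n K : Int) (b : List Int) (hnL : n ≤ (b.length : Int))
    (H : ∀ i : Int, 0 ≤ i → i < n → (PySem.List.pyGetD b i 0 ≤ 0 ↔ i < K))
    (hK0 : 0 ≤ K) (hKn : K ≤ n) :
    ∀ (c : Nat) (i s : Int), 0 ≤ i → 2 ∣ i → i ≤ 2 * PySem.Int.floordiv K 2 →
      (2 * PySem.Int.floordiv K 2 - i).toNat ≤ c →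
      tcFin n b (tcGo n b s i) =
        s - 2 * ((b.take (2 * PySem.Int.floordiv K 2).toNat).drop i.toNat).sum
          + (if PySem.Int.mod K 2 = 1 ∧ K < n then
               (if 0 < -PySem.List.pyGetD b (K - 1) 0 - PySem.List.pyGetD b K 0
                then 2 * (-PySem.List.pyGetD b (K - 1) 0 - PySem.List.pyGetD b K 0) else 0)
             else 0) := by
  have hdm := PySem.Int.floordiv_mul_add_mod K 2
  have hm2 := PySem.Int.mod_two_eq K
  set M := 2 * PySem.Int.floordiv K 2 with hM
  have htlen : (b.take M.toNat).length = M.toNat := by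
    rw [List.length_take]
    omega
  have hatM : ∀ s : Int,
      tcFin n b (tcGo n b s M) =
        s - 2 * ((b.take M.toNat).drop M.toNat).sum
          + (if PySem.Int.mod K 2 = 1 ∧ K < n then
               (if 0 < -PySem.List.pyGetD b (K - 1) 0 - PySem.List.pyGetD b K 0
                then 2 * (-PySem.List.pyGetD b (K - 1) 0 - PySem.List.pyGetD b K 0) else 0)
             else 0) := by
    intro s
    rw [List.drop_eq_nil_of_le (by omega), List.sum_nil, tcGo_at_M n K b hnL H hK0 hKn s]
    ring_nf
  intro c
  induction c with
  | zero =>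
    intro i s h0 h2 hiM hc
    have hiM' : i = M := by omega
    subst hiM'
    exact hatM s
  | succ c ih =>
    intro i s h0 h2 hiM hc
    by_cases hieq : i = M
    · subst hieq
      exact hatM s
    · -- i < M: a full non-positive pair, accumulate and recurse
      have hilt : i + 1 < M := by omega
      have hin : i < n := by omega
      have hlast : ¬ i = n - 1 := by omega
      have ha1 : PySem.List.pyGetD b i 0 ≤ 0 := by
        rw [H i h0 (by omega)]; omega
      have ha2 : PySem.List.pyGetD b (i + 1) 0 ≤ 0 := by
        rw [H (i + 1) (by omega) (by omega)]; omega
      rw [tcGo, dif_pos hin, pyGet?_some_of_lt b i h0 (by omega)]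
      simp only []
      rw [if_neg hlast, pyGet?_some_of_lt b (i + 1) (by omega) (by omega)]
      simp only []
      rw [if_pos ⟨ha1, ha2⟩]
      rw [ih (i + 2) _ (by omega) (by omega) (by omega) (by omega)]
      -- peel the two summands off the segment sum
      have hi1 : i.toNat < (b.take M.toNat).length := by omega
      have hi2 : i.toNat + 1 < (b.take M.toNat).length := by omega
      have hd1 : (b.take M.toNat).drop i.toNat =
          (b.take M.toNat)[i.toNat] :: (b.take M.toNat).drop (i.toNat + 1) :=
        List.drop_eq_getElem_cons hi1
      have hd2 : (b.take M.toNat).drop (i.toNat + 1) =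
          (b.take M.toNat)[i.toNat + 1] :: (b.take M.toNat).drop (i.toNat + 1 + 1) :=
        List.drop_eq_getElem_cons hi2
      have hip2 : (i + 2).toNat = i.toNat + 1 + 1 := by omega
      have hg1 : (b.take M.toNat)[i.toNat] = b[i.toNat]'(by omega) := List.getElem_take
      have hg2 : (b.take M.toNat)[i.toNat + 1] = b[i.toNat + 1]'(by omega) := List.getElem_take
      have hp1 : PySem.List.pyGetD b i 0 = b[i.toNat]'(by omega) :=
        PySem.List.pyGetD_eq_getElem b 0 h0 (by omega)
      have hp2 : PySem.List.pyGetD b (i + 1) 0 = b[i.toNat + 1]'(by omega) := by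
        have e := PySem.List.pyGetD_eq_getElem b (i := i + 1) 0 (by omega) (by omega)
        rw [e]
        congr 1
        omega
      rw [hip2, hd1, hd2, List.sum_cons, List.sum_cons, hg1, hg2, hp1, hp2]
      ring

-- ===== VERDICT (by name: the statement is the Claim_ definition above) =====
theorem tc_spec : Claim_equal_tc := by
  intro n a _hdom hpre
  unfold Spec_tc Pre_tc at *
  simp only [tc, tc_alt]
  set b := pySort a with hb
  by_cases hn : n ≤ 0
  · -- n ≤ 0: both sides are just sum(a)
    have hgo : tcGo n b b.sum 0 = Sum.inr (b.sum, none) := by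
      rw [tcGo, dif_neg (by omega)]
    rw [hgo]
    have hbis : tcBis b 0 n = 0 := by rw [tcBis, dif_neg (by omega)]
    rw [hbis]
    have h1 : (2 : Int) * PySem.Int.floordiv 0 2 = 0 := by decide
    have h2 : ¬ (PySem.Int.mod 0 2 = 1 ∧ (0 : Int) < n) := by
      rintro ⟨hh, -⟩
      exact absurd hh (by decide)
    rw [h1, PySem.List.slice_to b (le_refl 0), if_neg h2]
    simp [tcFin]
  · rw [not_le] at hn
    have hnL : n ≤ (b.length : Int) := by
      rw [hb, pySort, List.length_mergeSort]
      exact hpre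
    have hpw : b.Pairwise (· ≤ ·) := by
      have h := List.pairwise_mergeSort (le := fun x y : Int => decide (x ≤ y))
        (fun a b c hab hbc => by simp only [decide_eq_true_eq] at *; omega)
        (fun a b => by simp only [Bool.or_eq_true, decide_eq_true_eq]; omega) a
      rw [hb, pySort]
      exact h.imp (by simp)
    set Kn : Nat := (b.take n.toNat).countP (fun x => decide (x ≤ 0)) with hKn
    set K : Int := (Kn : Int) with hK
    have hlen_take : (b.take n.toNat).length = n.toNat := by
      rw [List.length_take]
      omega
    have hKnn : Kn ≤ n.toNat := le_trans List.countP_le_length (le_of_eq hlen_take)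
    have hK0 : 0 ≤ K := by omega
    have hKn' : K ≤ n := by omega
    have H : ∀ i : Int, 0 ≤ i → i < n → (PySem.List.pyGetD b i 0 ≤ 0 ↔ i < K) := by
      intro i h0 hi
      have hiN : i.toNat < (b.take n.toNat).length := by omega
      have hbnd := countP_sorted_boundary (b.take n.toNat)
        (hpw.sublist (List.take_sublist _ _)) i.toNat hiN
      rw [List.getElem_take] at hbnd
      rw [PySem.List.pyGetD_eq_getElem b 0 h0 (by omega), hbnd]
      omega
    have hdm := PySem.Int.floordiv_mul_add_mod K 2
    have hm2 := PySem.Int.mod_two_eq K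
    have hM0 : 0 ≤ 2 * PySem.Int.floordiv K 2 := by omega
    have hbis : tcBis b 0 n = K :=
      tcBis_eq n K b H (n - 0).toNat 0 n (le_refl 0) hK0 hKn' (le_refl n) (by omega)
    rw [hbis]
    have hmain := tcGo_main n K b hnL H hK0 hKn'
      (2 * PySem.Int.floordiv K 2).toNat 0 b.sum (le_refl 0) ⟨0, by ring⟩ hM0 (by omega)
    rw [hmain, PySem.List.slice_to b hM0]
    simp only [Int.toNat_zero, List.drop_zero]
    split_ifs with h1 h2
    · ring
    · ring
    · ring
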